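-- pv_equiv track=rewrite | github.com/bessserh/consoleChat | bes_frame.py | is_email
-- ===== SOURCE A (Python) =====
-- def is_email(login):  # рабочая функция из прошлого занятия
--     if login[0].isalpha() == True or login[0].isdigit() == True:
--         if login[len(login) - 1].isalpha() == True:
--             counter = [False, 0, False]
--             for i in range(1, len(login) - 1):
--                 if login[i] == '@':
--                     counter[0] = True
--                     counter[1] += 1
--                 if login[i] == '.' and counter[1] == 1:
--                     counter[2] = True
--             if counter[0] == True and counter[1] == 1 and counter[2] == True:
--                 return True
--             else:
--                 return False
--         else:
--             return False
--     else:
--         return False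
-- ===== SOURCE B (Python) =====
-- def is_email(login):
--     if not (login[0].isalpha() or login[0].isdigit()):
--         return False
--     if not login[-1].isalpha():
--         return False
--     parts = login[1:-1].split('@')
--     return len(parts) == 2 and '.' in parts[1]
-- ===== Notes on version B (the rewrite author's own statement) =====
-- stated objective: simpler
-- what changed: A's manual three-cell counter state machine scanning interior indices is replaced by slicing off the first/last characters, splitting the interior on '@', and checking that exactly two parts result with a '.' in the part after the '@'.
import Mathlib
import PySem

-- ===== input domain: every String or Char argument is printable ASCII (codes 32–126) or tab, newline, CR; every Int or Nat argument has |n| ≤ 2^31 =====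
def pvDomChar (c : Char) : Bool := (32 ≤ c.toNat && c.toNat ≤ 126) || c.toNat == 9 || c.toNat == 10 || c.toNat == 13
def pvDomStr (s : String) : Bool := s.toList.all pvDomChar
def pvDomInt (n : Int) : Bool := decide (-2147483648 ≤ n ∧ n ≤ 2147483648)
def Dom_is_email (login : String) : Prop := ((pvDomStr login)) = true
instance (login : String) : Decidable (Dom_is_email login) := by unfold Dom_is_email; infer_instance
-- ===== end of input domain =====

-- B replaces A's manual counter state machine over the interior characters by splitting the
-- interior on '@' and testing '.'-membership in the part after it (objective: simpler); return values only.

-- ===== PORT A =====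
-- loop body of A's 'for i in range(1, len(login)-1)': counter = [found@, count@, dotAfter@]
def stepA (st : Bool × Int × Bool) (c : Char) : Bool × Int × Bool :=
  let st1 := if c == '@' then (true, st.2.1 + 1, st.2.2) else st
  if c == '.' && st1.2.1 == 1 then (st1.1, st1.2.1, true) else st1

def is_email (login : String) : Bool :=
  let cs := login.toList
  match PySem.List.pyGet? cs 0 with
  | none => false
  | some c0 =>
    if PySem.Str.isalpha c0 || PySem.Str.isdigit c0 then
      match PySem.List.pyGet? cs ((cs.length : Int) - 1) with
      | none => false
      | some cl =>
        if PySem.Str.isalpha cl then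
          let counter := (PySem.List.pyRange 1 ((cs.length : Int) - 1) 1).foldl
            (fun st i => stepA st (PySem.List.pyGetD cs i ' ')) (false, (0 : Int), false)
          if counter.1 && counter.2.1 == 1 && counter.2.2 then true else false
        else false
    else false

-- ===== PORT B =====
def is_email_alt (login : String) : Bool :=
  let cs := login.toList
  match PySem.List.pyGet? cs 0, PySem.List.pyGet? cs (-1) with
  | some c0, some cl =>
    if !(PySem.Str.isalpha c0 || PySem.Str.isdigit c0) then false
    else if !(PySem.Str.isalpha cl) then false
    else
      let parts := (PySem.List.slice cs (some 1) (some (-1))).splitOn '@'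
      parts.length == 2 && (parts.getD 1 []).contains '.'
  | _, _ => false

-- ===== PRECONDITION & SPEC =====
-- Pre_ excludes only the empty string, on which A (and B alike) raise IndexError at login[0].
def Pre_is_email (login : String) : Prop := login ≠ ""
instance (login : String) : Decidable (Pre_is_email login) := by unfold Pre_is_email; infer_instance
def pvWitness_is_email : String := "a@b.c"

def Spec_is_email (login : String) (out : Bool) : Prop := out = is_email_alt login
instance (login : String) (out : Bool) : Decidable (Spec_is_email login out) := by unfold Spec_is_email; infer_instance

-- ===== CLAIM (what is proved, stated in full; the proofs are below) =====
def Claim_equal_is_email : Prop := ∀ (login : String), Dom_is_email login → Pre_is_email login → Spec_is_email login (is_email login)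

-- ===== LEMMAS AND PROOFS =====

lemma stepA_at (b0 : Bool) (n : Int) (b2 : Bool) : stepA (b0, n, b2) '@' = (true, n + 1, b2) := by
  simp [stepA]

lemma stepA_ne (c : Char) (hc : (c == '@') = false) (b0 : Bool) (n : Int) (b2 : Bool) :
    stepA (b0, n, b2) c = (b0, n, b2 || ((c == '.') && (n == 1))) := by
  simp only [stepA, hc, Bool.false_eq_true, if_false]
  cases h : ((c == '.') && ((n : Int) == 1)) <;> simp_all

lemma fold_count (l : List Char) (b0 : Bool) (n : Int) (b2 : Bool) :
    (l.foldl stepA (b0, n, b2)).2.1 = n + l.count '@' := by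
  induction l generalizing b0 n b2 with
  | nil => simp
  | cons c t ih =>
    by_cases hc : c = '@'
    · subst hc
      rw [List.foldl_cons, stepA_at, ih]
      simp
      omega
    · rw [List.foldl_cons, stepA_ne c (by simp [hc]), ih]
      simp [List.count_cons, hc]

lemma fold_no_at_zero (l : List Char) (h : '@' ∉ l) (b0 b2 : Bool) :
    l.foldl stepA (b0, 0, b2) = (b0, 0, b2) := by
  induction l with
  | nil => rfl
  | cons c t ih =>
    have hc : (c == '@') = false := by simp; rintro rfl; exact h (by simp)
    rw [List.foldl_cons, stepA_ne c hc]
    simp only [show ((0 : Int) == 1) = false from by decide, Bool.and_false, Bool.or_false]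
    exact ih (fun hm => h (List.mem_cons_of_mem _ hm))

lemma fold_one (l : List Char) (h : '@' ∉ l) (b0 b2 : Bool) :
    l.foldl stepA (b0, 1, b2) = (b0, 1, b2 || l.contains '.') := by
  induction l generalizing b2 with
  | nil => simp
  | cons c t ih =>
    have hc : (c == '@') = false := by simp; rintro rfl; exact h (by simp)
    have ht : '@' ∉ t := fun hm => h (List.mem_cons_of_mem _ hm)
    rw [List.foldl_cons, stepA_ne c hc, ih ht]
    rw [List.contains_cons]
    have : ('.' == c) = (c == '.') := by cases hcd : (c == '.') <;> simp_all <;> simp [Ne.symm hcd]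
    rw [this]
    simp [Bool.or_assoc]

lemma splitOn_length (l : List Char) : (l.splitOn '@').length = l.count '@' + 1 := by
  induction l with
  | nil => simp [List.splitOn]
  | cons c t ih =>
    simp only [List.splitOn] at *
    rw [List.splitOnP_cons]
    by_cases hc : c = '@'
    · simp [hc, ih]
    · have : (c == '@') = false := by simp [hc]
      simp [this, ih, hc]

lemma splitOn_no (l : List Char) (h : '@' ∉ l) : l.splitOn '@' = [l] := by
  induction l with
  | nil => simp [List.splitOn]
  | cons c t ih =>
    have hc : (c == '@') = false := by simp; rintro rfl; exact h (by simp)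
    simp only [List.splitOn] at *
    rw [List.splitOnP_cons, if_neg (by simp [hc]), ih (fun hm => h (List.mem_cons_of_mem _ hm))]
    rfl

lemma splitOn_first (p q : List Char) (h : '@' ∉ p) :
    ((p ++ '@' :: q).splitOn '@') = p :: q.splitOn '@' := by
  induction p with
  | nil => simp only [List.nil_append, List.splitOn]; rw [List.splitOnP_cons]; simp
  | cons c t ih =>
    have hc : (c == '@') = false := by simp; rintro rfl; exact h (by simp)
    have ht : '@' ∉ t := fun hm => h (List.mem_cons_of_mem _ hm)
    simp only [List.cons_append, List.splitOn] at *
    rw [List.splitOnP_cons, if_neg (by simp [hc]), ih ht]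
    rfl

lemma exists_first (l : List Char) (h : '@' ∈ l) :
    ∃ p q, l = p ++ '@' :: q ∧ '@' ∉ p := by
  induction l with
  | nil => cases h
  | cons c t ih =>
    by_cases hc : c = '@'
    · exact ⟨[], t, by simp [hc], by simp⟩
    · have hmem : '@' ∈ t := by
        rcases List.mem_cons.mp h with he | h
        · exact absurd he.symm hc
        · exact h
      rcases ih hmem with ⟨p, q, hpq, hp⟩
      refine ⟨c :: p, q, by simp [hpq], ?_⟩
      simp only [List.mem_cons, not_or]
      exact ⟨fun he => hc he.symm, hp⟩

lemma slice_one_neg_one (c : Char) (t : List Char) :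
    PySem.List.slice (c :: t) (some 1) (some (-1)) = t.dropLast := by
  rw [PySem.List.slice.eq_4]
  rcases t with _ | ⟨d, u⟩
  · simp [PySem.List.clampIdx]
  · simp [PySem.List.clampIdx, List.dropLast_eq_take]
    have : ¬ ((u.length : Int) + 1 < 0) := by omega
    simp [this]

lemma dropLast_tail (c : Char) (t : List Char) :
    ((c :: t).dropLast).drop 1 = t.dropLast := by
  rcases t with _ | ⟨d, u⟩
  · simp
  · simp

lemma core_eq (l : List Char) :
    (if (l.foldl stepA (false, 0, false)).1 && (l.foldl stepA (false, 0, false)).2.1 == 1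
        && (l.foldl stepA (false, 0, false)).2.2 then true else false)
    = (((l.splitOn '@').length == 2) && ((l.splitOn '@').getD 1 []).contains '.') := by
  by_cases hcount : l.count '@' = 1
  · have hmem : '@' ∈ l := List.count_pos_iff.mp (by omega)
    rcases exists_first l hmem with ⟨p, q, rfl, hp⟩
    have hq : '@' ∉ q := by
      have hpc : p.count '@' = 0 := List.count_eq_zero.mpr hp
      have : (p ++ '@' :: q).count '@' = p.count '@' + (q.count '@' + 1) := by
        simp [List.count_append]
      exact List.count_eq_zero.mp (by omega)
    rw [List.foldl_append, fold_no_at_zero p hp, List.foldl_cons, stepA_at,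
      show (0 : Int) + 1 = 1 from rfl, fold_one q hq]
    rw [splitOn_first p q hp, splitOn_no q hq]
    simp
  · have hL : ((l.foldl stepA (false, 0, false)).2.1 == 1) = false := by
      rw [fold_count]
      simp
      omega
    have hR : (((l.splitOn '@').length : Nat) == 2) = false := by
      rw [splitOn_length]
      simp
      omega
    simp [hL, hR]

lemma ports_agree (login : String) (hpre : login ≠ "") : is_email login = is_email_alt login := by
  unfold is_email is_email_alt
  obtain ⟨c0, rest, hL⟩ : ∃ c t, login.toList = c :: t := by
    rcases hcs : login.toList with _ | ⟨c, t⟩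
    · exact absurd (String.toList_eq_nil_iff.mp hcs) hpre
    · exact ⟨c, t, rfl⟩
  rw [hL]
  dsimp only
  rw [PySem.List.pyGet?_zero_cons]
  have hlen : (((c0 :: rest).length : Int) - 1) = ((rest.length : Nat) : Int) := by simp
  rw [hlen, PySem.List.pyGet?_natCast, PySem.List.pyGet?_neg_one]
  have hlast : (c0 :: rest)[rest.length]? = (c0 :: rest).getLast? := by
    rw [List.getLast?_eq_getElem?]
    simp
  rw [hlast]
  rcases hg : (c0 :: rest).getLast? with _ | cl
  · simp at hg
  · dsimp only
    cases h1 : (PySem.Str.isalpha c0 || PySem.Str.isdigit c0) with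
    | false => simp
    | true =>
      rw [if_pos rfl, if_neg (show ¬ ((!true) = true) by simp)]
      cases h2 : PySem.Str.isalpha cl with
      | false => simp
      | true =>
        rw [if_pos rfl, if_neg (show ¬ ((!true) = true) by simp)]
        have hbody : ∀ (st : Bool × Int × Bool), ∀ i ∈ PySem.List.pyRange 1 (PySem.List.len ((c0 :: rest).dropLast)) 1,
            stepA st (PySem.List.pyGetD (c0 :: rest) i ' ') = stepA st (PySem.List.pyGetD ((c0 :: rest).dropLast) i ' ') := by
          intro st i hi
          rcases (PySem.List.mem_pyRange_one).mp hi with ⟨hi1, hi2⟩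
          have hlt : i < ((c0 :: rest).dropLast.length : Int) := by
            simpa [PySem.List.len] using hi2
          rw [PySem.List.pyGetD_eq_getElem _ _ (by omega) (by
              have h3 : (c0 :: rest).dropLast.length = (c0 :: rest).length - 1 := List.length_dropLast
              omega),
            PySem.List.pyGetD_eq_getElem _ _ (by omega) hlt]
          congr 1
          rw [List.getElem_dropLast]
        have hb : ((rest.length : Nat) : Int) = PySem.List.len ((c0 :: rest).dropLast) := by
          simp [PySem.List.len]
        rw [hb,
          PySem.List.foldl_congr_mem _ _ (fun st i => stepA st (PySem.List.pyGetD ((c0 :: rest).dropLast) i ' ')) _ hbody,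
          PySem.List.foldl_pyRange_pyGetD ((c0 :: rest).dropLast) ' ' stepA (false, (0 : Int), false) (by omega : (0:Int) ≤ 1)]
        rw [show ((1:Int).toNat) = 1 from rfl, dropLast_tail, slice_one_neg_one]
        exact core_eq rest.dropLast

-- ===== VERDICT (by name: the statement is the Claim_ definition above) =====
theorem is_email_spec : Claim_equal_is_email := by
  intro login _ hpre
  unfold Spec_is_email
  exact ports_agree login hpre
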